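-- pv_equiv track=rewrite | github.com/w0rdsm1th/Project_Euler | q054.py | _get_hand_stats
-- ===== SOURCE A (Python) =====
-- from collections import Counter
--
-- def _get_hand_stats(hnd):
--     face_card_ordinal_map = {"T": 10, "J": 11, "Q": 12, "K": 13, "A": 14, }
--
--     # optimisation - create counter as extract card values from hand
--     vals = [face_card_ordinal_map.get(crd[0]) if crd[0] in face_card_ordinal_map else int(crd[0]) for crd in hnd]
--     suits = [crd[1] for crd in hnd]
--
--     occ_counter = Counter(vals)
--     occ_counter_tuples = [(crd_val, occ) for crd_val, occ in occ_counter.items()]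
--
--     # sort on number of occurrences, then card value
--     occ_counter_tuples = sorted(occ_counter_tuples, key=lambda x: (x[1], x[0]), reverse=True)
--
--     return occ_counter_tuples, len(set(suits))
-- ===== SOURCE B (Python) =====
-- def _get_hand_stats(hnd):
--     face_card_ordinal_map = {"T": 10, "J": 11, "Q": 12, "K": 13, "A": 14, }
--
--     vals = sorted(
--         (face_card_ordinal_map[crd[0]] if crd[0] in face_card_ordinal_map else int(crd[0]) for crd in hnd),
--         reverse=True)
--
--     # run-length pass over the descending value list: consecutive equal values form one group
--     pairs = []
--     i = 0
--     n = len(vals)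
--     while i < n:
--         j = i
--         while j < n and vals[j] == vals[i]:
--             j += 1
--         pairs.append((vals[i], j - i))
--         i = j
--
--     # same final ordering as before: by (occurrences, value), descending
--     pairs = sorted(pairs, key=lambda x: (x[1], x[0]), reverse=True)
--
--     return pairs, len({crd[1] for crd in hnd})
-- ===== Notes on version B (the rewrite author's own statement) =====
-- stated objective: alternative
-- what changed: Counting via collections.Counter is replaced by sorting the value list descending and doing one run-length grouping pass over consecutive equal values; the final (occurrences, value) descending sort is kept.
import Mathlib
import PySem

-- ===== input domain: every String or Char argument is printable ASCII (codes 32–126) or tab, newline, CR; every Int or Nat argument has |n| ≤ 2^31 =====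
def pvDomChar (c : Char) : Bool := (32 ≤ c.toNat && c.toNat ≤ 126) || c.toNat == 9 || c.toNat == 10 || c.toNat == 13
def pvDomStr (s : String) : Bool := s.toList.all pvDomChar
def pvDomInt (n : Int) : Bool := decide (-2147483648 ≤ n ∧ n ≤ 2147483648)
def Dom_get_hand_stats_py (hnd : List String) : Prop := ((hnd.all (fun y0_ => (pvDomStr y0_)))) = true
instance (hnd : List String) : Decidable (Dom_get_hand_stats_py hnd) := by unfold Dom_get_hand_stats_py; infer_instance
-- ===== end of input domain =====

-- B replaces the Counter by sort-then-run-length grouping of the values; same final (occurrences, value) descending sort; alternative decomposition, not claimed faster.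

-- ===== PORT A =====
-- the face_card_ordinal_map dict (Char keys: crd[0] is a 1-character string)
def pvFaceMap : PySem.Dict Char Int :=
  ((((PySem.Dict.empty.insert 'T' 10).insert 'J' 11).insert 'Q' 12).insert 'K' 13).insert 'A' 14

-- 'face_card_ordinal_map.get(crd[0]) if crd[0] in face_card_ordinal_map else int(crd[0])'
-- (the .getD defaults are unreachable under Pre_: the key is present / the digit parses / the index is in range)
def pvCardVal (crd : String) : Int :=
  match PySem.Str.pyGet? crd 0 with
  | some c => if pvFaceMap.contains c then (pvFaceMap.get? c).getD 0 else (PySem.Int.ofChars? [c]).getD 0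
  | none => 0

-- 'crd[1]' (default unreachable under Pre_)
def pvSuit (crd : String) : Char := (PySem.Str.pyGet? crd 1).getD ' '

def get_hand_stats_py (hnd : List String) : (List (Int × Int)) × Int :=
  let vals := hnd.map pvCardVal
  let suits := hnd.map pvSuit
  let occ_counter := PySem.Dict.counter vals
  let occ_counter_tuples := occ_counter.items.map (fun x => (x.1, x.2))
  let occ_counter_tuples := PySem.List.sorted2 occ_counter_tuples (fun x => x.2) (fun x => x.1) true
  (occ_counter_tuples, ((PySem.Set.ofList suits).length : Int))

-- ===== PORT B =====
-- the run-length pass of Source B: the inner 'while vals[j] == vals[i]' scan of one group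
-- is the takeWhile part, the outer loop resumes at the dropWhile remainder
def pvRunLength : List Int → List (Int × Int)
  | [] => []
  | v :: t =>
    (v, 1 + (List.takeWhile (fun x => x == v) t).length) ::
      pvRunLength (List.dropWhile (fun x => x == v) t)
termination_by l => l.length
decreasing_by
  simp only [List.length_cons]
  exact Nat.lt_succ_of_le (List.length_dropWhile_le _ _)

def get_hand_stats_py_alt (hnd : List String) : (List (Int × Int)) × Int :=
  let vals := PySem.List.sorted (hnd.map pvCardVal) (fun x => x) true
  let pairs := pvRunLength vals
  let pairs := PySem.List.sorted2 pairs (fun x => x.2) (fun x => x.1) true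
  (pairs, ((PySem.Set.ofList (hnd.map pvSuit)).length : Int))

-- ===== PRECONDITION & SPEC =====
-- Pre_ excludes exactly the hands on which the Python raises: a card shorter than 2
-- characters (IndexError on crd[0]/crd[1]) or whose first character is neither a face
-- letter nor a digit (ValueError from int(crd[0])).
def Pre_get_hand_stats_py (hnd : List String) : Prop :=
  ∀ crd ∈ hnd, 2 ≤ crd.toList.length ∧
    (crd.toList.head?.any (fun c => c ∈ (['T', 'J', 'Q', 'K', 'A'] : List Char) || c.isDigit)) = true
instance (hnd : List String) : Decidable (Pre_get_hand_stats_py hnd) := by unfold Pre_get_hand_stats_py; infer_instance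

def pvWitness_get_hand_stats_py : List String := ["AS", "2S", "2H"]

def Spec_get_hand_stats_py (hnd : List String) (out : (List (Int × Int)) × Int) : Prop := out = get_hand_stats_py_alt hnd
instance (hnd : List String) (out : (List (Int × Int)) × Int) : Decidable (Spec_get_hand_stats_py hnd out) := by unfold Spec_get_hand_stats_py; infer_instance

-- ===== CLAIM (what is proved, stated in full; the proofs are below) =====
def Claim_equal_get_hand_stats_py : Prop := ∀ (hnd : List String), Dom_get_hand_stats_py hnd → Pre_get_hand_stats_py hnd → Spec_get_hand_stats_py hnd (get_hand_stats_py hnd)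

-- ===== LEMMAS AND PROOFS =====

-- the tuple key (x[1], x[0]) of both final sorts, as a single linear-order key
def pvKey (x : Int × Int) : Lex (Int × Int) := toLex (x.2, x.1)

theorem pvKey_injective : Function.Injective pvKey := by
  intro a b h
  have h' : (a.2, a.1) = (b.2, b.1) := congrArg ofLex h
  cases a; cases b
  simp_all

-- sorted2 with keys (x.2, x.1) IS sorted with the lexicographic key pvKey
theorem pv_before_eq :
    (fun (a b : Int × Int) => decide (a.2 < b.2) || (!decide (b.2 < a.2) && decide (a.1 < b.1)))
      = fun a b => decide (pvKey a < pvKey b) := by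
  funext a b
  simp only [pvKey, Prod.Lex.toLex_lt_toLex]
  by_cases h1 : a.2 < b.2 <;> by_cases h2 : b.2 < a.2 <;> by_cases h3 : a.1 < b.1 <;>
    simp [h1, h2, h3] <;> omega

theorem pv_before_eq' :
    (fun (a b : Int × Int) => decide (b.2 < a.2) || (!decide (a.2 < b.2) && decide (b.1 < a.1)))
      = fun a b => decide (pvKey b < pvKey a) := by
  funext a b
  exact congrFun (congrFun pv_before_eq b) a

theorem pv_sorted2_eq_sorted_key (xs : List (Int × Int)) (rev : Bool) :
    PySem.List.sorted2 xs (fun x => x.2) (fun x => x.1) rev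
      = PySem.List.sorted xs pvKey rev := by
  simp only [PySem.List.sorted2, PySem.List.sorted, pv_before_eq, pv_before_eq']

-- run-length pairs of a descending list are, up to order, the Counter items
theorem pvRunLength_perm (l : List Int) (h : l.Pairwise (fun a b => b ≤ a)) :
    (pvRunLength l).Perm ((PySem.Set.ofList l).map (fun k => (k, (l.count k : Int)))) := by
  induction l using pvRunLength.induct with
  | case1 => simp [pvRunLength]
  | case2 v t ih =>
    have htd : List.takeWhile (fun x => x == v) t ++ List.dropWhile (fun x => x == v) t = t :=
      List.takeWhile_append_dropWhile
    have hrunv : ∀ x ∈ List.takeWhile (fun x => x == v) t, x = v := by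
      intro x hx
      simpa using List.mem_takeWhile_imp hx
    have htle : ∀ x ∈ t, x ≤ v := (List.pairwise_cons.mp h).1
    have hrestpw : (List.dropWhile (fun x => x == v) t).Pairwise (fun a b => b ≤ a) :=
      List.Pairwise.sublist (List.dropWhile_sublist _) (List.pairwise_cons.mp h).2
    have hvrest : v ∉ List.dropWhile (fun x => x == v) t := by
      intro hv
      cases hd : List.dropWhile (fun x => x == v) t with
      | nil => rw [hd] at hv; simp at hv
      | cons d r =>
        have hdne : d ≠ v := by
          have := List.head?_dropWhile_not (fun x => x == v) t
          rw [hd] at this; simpa using this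
        have hdmem : d ∈ t := by rw [← htd, hd]; simp
        have hdlt : d < v := lt_of_le_of_ne (htle d hdmem) hdne
        have hpw := hrestpw; rw [hd] at hpw hv
        rcases List.mem_cons.mp hv with h1 | h1
        · exact hdne h1.symm
        · have : v ≤ d := (List.pairwise_cons.mp hpw).1 v h1
          omega
    -- counts
    have hcrun : List.count v (List.takeWhile (fun x => x == v) t)
        = (List.takeWhile (fun x => x == v) t).length :=
      List.count_eq_length.mpr (fun b hb => ((hrunv b hb).symm ▸ rfl))
    have hct : List.count v t = (List.takeWhile (fun x => x == v) t).length := by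
      conv_lhs => rw [← htd]
      rw [List.count_append, hcrun, List.count_eq_zero.mpr hvrest]
      omega
    have hcv : List.count v (v :: t) = 1 + (List.takeWhile (fun x => x == v) t).length := by
      rw [List.count_cons_self, hct]; omega
    have hck : ∀ k, k ≠ v → List.count k (v :: t) = List.count k (List.dropWhile (fun x => x == v) t) := by
      intro k hk
      have h1 : List.count k t = List.count k (List.dropWhile (fun x => x == v) t) := by
        conv_lhs => rw [← htd]
        rw [List.count_append, List.count_eq_zero.mpr (fun hkr => hk (hrunv k hkr))]
        omega
      rw [List.count_cons, h1]
      simp [Ne.symm hk]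
    -- the distinct values
    have hperm1 : (PySem.Set.ofList (v :: t)).Perm
        (v :: PySem.Set.ofList (List.dropWhile (fun x => x == v) t)) := by
      refine (List.perm_ext_iff_of_nodup (PySem.Set.nodup_ofList _) ?_).mpr ?_
      · exact List.nodup_cons.mpr ⟨by simpa [PySem.Set.mem_ofList] using hvrest, PySem.Set.nodup_ofList _⟩
      · intro a
        simp only [PySem.Set.mem_ofList, List.mem_cons]
        constructor
        · rintro (rfl | ha)
          · exact Or.inl rfl
          · rw [← htd] at ha
            rcases List.mem_append.mp ha with ha | ha
            · exact Or.inl (hrunv a ha)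
            · exact Or.inr (by simpa [PySem.Set.mem_ofList] using ha)
        · rintro (rfl | ha)
          · exact Or.inl rfl
          · exact Or.inr (by rw [← htd]; exact List.mem_append.mpr (Or.inr (by simpa [PySem.Set.mem_ofList] using ha)))
    -- assemble
    have hmapc : (PySem.Set.ofList (List.dropWhile (fun x => x == v) t)).map
          (fun k => (k, (List.count k (v :: t) : Int)))
        = (PySem.Set.ofList (List.dropWhile (fun x => x == v) t)).map
          (fun k => (k, (List.count k (List.dropWhile (fun x => x == v) t) : Int))) := by
      refine List.map_congr_left (fun k hk => ?_)
      have hkmem : k ∈ List.dropWhile (fun x => x == v) t := (PySem.Set.mem_ofList _ _).mp hk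
      have hkne : k ≠ v := fun he => hvrest (he ▸ hkmem)
      rw [hck k hkne]
    rw [pvRunLength]
    refine List.Perm.trans (List.Perm.cons _ (ih hrestpw)) ?_
    have hcons : (v, 1 + ((List.takeWhile (fun x => x == v) t).length : Int))
          :: (PySem.Set.ofList (List.dropWhile (fun x => x == v) t)).map
              (fun k => (k, (List.count k (List.dropWhile (fun x => x == v) t) : Int)))
        = (v :: PySem.Set.ofList (List.dropWhile (fun x => x == v) t)).map
            (fun k => (k, (List.count k (v :: t) : Int))) := by
      rw [List.map_cons, hmapc, hcv]
      push_cast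
      ring_nf
    rw [hcons]
    exact (hperm1.map _).symm

theorem pv_main (vals : List Int) :
    PySem.List.sorted ((PySem.Set.ofList vals).map (fun k => (k, (vals.count k : Int)))) pvKey true
      = PySem.List.sorted (pvRunLength (PySem.List.sorted vals (fun x => x) true)) pvKey true := by
  have hsvpw : (PySem.List.sorted vals (fun x => x) true).Pairwise (fun a b => b ≤ a) :=
    PySem.List.sorted_pairwise_rev vals (fun x => x)
  have hrl := pvRunLength_perm _ hsvpw
  have hsp : (PySem.List.sorted vals (fun x => x) true).Perm vals :=
    PySem.List.sorted_perm vals (fun x => x) true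
  have hof : (PySem.Set.ofList (PySem.List.sorted vals (fun x => x) true)).Perm (PySem.Set.ofList vals) := by
    refine (List.perm_ext_iff_of_nodup (PySem.Set.nodup_ofList _) (PySem.Set.nodup_ofList _)).mpr ?_
    intro a
    rw [PySem.Set.mem_ofList, PySem.Set.mem_ofList]
    exact hsp.mem_iff
  have hmap_eq : (PySem.Set.ofList (PySem.List.sorted vals (fun x => x) true)).map
        (fun k => (k, (List.count k (PySem.List.sorted vals (fun x => x) true) : Int)))
      = (PySem.Set.ofList (PySem.List.sorted vals (fun x => x) true)).map
        (fun k => (k, (List.count k vals : Int))) := by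
    refine List.map_congr_left (fun k _ => ?_)
    rw [hsp.count_eq]
  have hperm : (PySem.List.sorted (pvRunLength (PySem.List.sorted vals (fun x => x) true)) pvKey true).Perm
      ((PySem.Set.ofList vals).map (fun k => (k, (vals.count k : Int)))) := by
    refine (PySem.List.sorted_perm _ _ _).trans (hrl.trans ?_)
    rw [hmap_eq]
    exact hof.map _
  have hnodup_items : ((PySem.Set.ofList vals).map (fun k => (k, (vals.count k : Int)))).Nodup :=
    List.Nodup.map_on (fun x _ y _ h => congrArg Prod.fst h) (PySem.Set.nodup_ofList _)
  have hysnodup : (PySem.List.sorted (pvRunLength (PySem.List.sorted vals (fun x => x) true)) pvKey true).Nodup :=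
    hperm.symm.nodup hnodup_items
  have hpwlt : (PySem.List.sorted (pvRunLength (PySem.List.sorted vals (fun x => x) true)) pvKey true).Pairwise
      (fun a b => pvKey b < pvKey a) := by
    refine ((PySem.List.sorted_pairwise_rev _ pvKey).and hysnodup).imp ?_
    rintro a b ⟨hle, hne⟩
    exact lt_of_le_of_ne hle (fun he => hne (pvKey_injective he).symm)
  exact PySem.List.sorted_rev_eq_of_perm_of_pairwise_gt _ _ pvKey hperm hpwlt

theorem get_hand_stats_py_spec : Claim_equal_get_hand_stats_py := by
  unfold Claim_equal_get_hand_stats_py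
  intro hnd _ _
  unfold Spec_get_hand_stats_py get_hand_stats_py get_hand_stats_py_alt
  simp only
  refine Prod.ext ?_ rfl
  simp only
  rw [pv_sorted2_eq_sorted_key, pv_sorted2_eq_sorted_key, PySem.Dict.items_counter]
  simp only [List.map_map, Function.comp_def, Prod.mk.eta]
  exact pv_main _
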